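-- pv_equiv track=rewrite | github.com/ahdithanu/signalradar | Backend/app/ingestion/normalizers/positioning.py | _match_gtm_keywords
-- ===== SOURCE A (Python) =====
-- _GTM_KEYWORD_CATEGORIES: dict[str, str] = {
--     # ICP upmarket shifts
--     "enterprise": "icp_upmarket",
--     "mid-market": "icp_upmarket",
--     "upmarket": "icp_upmarket",
--     "regulated industries": "icp_upmarket",
--     "fortune 500": "icp_upmarket",
--     "platform": "icp_upmarket",
--     # Sales motion shifts
--     "contact sales": "gtm_sales_led",
--     "talk to": "gtm_sales_led",
--     "schedule a consultation": "gtm_sales_led",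
--     "request a demo": "gtm_sales_led",
--     "custom pricing": "gtm_sales_led",
--     "dedicated account manager": "gtm_sales_led",
--     "sla": "gtm_sales_led",
--     "security advisor": "gtm_sales_led",
--     "sales team": "gtm_sales_led",
--     "enterprise pilot": "gtm_sales_led",
--     "team trial": "gtm_sales_led",
--     # Vertical expansion
--     "financial services": "new_vertical",
--     "healthcare": "new_vertical",
--     "hospital": "new_vertical",
--     "hospital systems": "new_vertical",
--     "health system": "new_vertical",
--     "banks": "new_vertical",
--     "fintech": "new_vertical",
--     "insurance": "new_vertical",
--     "government": "new_vertical",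
--     # Geographic expansion
--     "emea": "new_market",
--     "europe": "new_market",
--     "apac": "new_market",
--     "cross-border": "new_market",
--     "emea sales team": "new_market",
--     # Compliance / trust (supports upmarket shift)
--     "soc 2": "compliance",
--     "fedramp": "compliance",
--     "hipaa": "compliance",
--     "pci dss": "compliance",
--     "gdpr": "compliance",
--     # Team/org targeting (individual → team shift)
--     "data teams": "icp_upmarket",
--     "collaborate": "icp_upmarket",
--     "organization": "icp_upmarket",
--     "governed metrics": "icp_upmarket",
--     "role-based access": "icp_upmarket",
-- }
--
-- def _match_gtm_keywords(extracted: list[str] | None) -> list[tuple[str, str]]: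
--     """Return matched (keyword, category) pairs from extracted keywords.
--
--     Matches longest GTM keyword first to avoid partial-match collisions
--     (e.g. "EMEA sales team" must match new_market, not gtm_sales_led
--     via the shorter "sales team" substring).
--     """
--     if not extracted or not isinstance(extracted, list):
--         return []
--
--     # Sort GTM keywords longest-first so "emea sales team" matches
--     # before "sales team".
--     sorted_gtm = sorted(
--         _GTM_KEYWORD_CATEGORIES.items(), key=lambda x: len(x[0]), reverse=True
--     )
--
--     matches: list[tuple[str, str]] = []
--     seen_cats: set[str] = set()
--     for kw in extracted:
--         if not isinstance(kw, str):
--             continue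
--         kw_lower = kw.lower().strip()
--         for gtm_kw, cat in sorted_gtm:
--             # Match if: exact match, or GTM keyword is a substring of
--             # the extracted keyword (e.g. "enterprise" in "enterprise pilot").
--             # Do NOT match the reverse — "enterprise" should not match
--             # "enterprise pilot" when extracted_kw is "enterprise".
--             if kw_lower == gtm_kw or gtm_kw in kw_lower:
--                 if cat not in seen_cats or cat in ("new_vertical", "compliance"):
--                     matches.append((kw, cat))
--                     seen_cats.add(cat)
--                 break
--     return matches
-- ===== SOURCE B (Python) =====
-- _GTM_KEYWORD_CATEGORIES: dict[str, str] = {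
--     "enterprise": "icp_upmarket",
--     "mid-market": "icp_upmarket",
--     "upmarket": "icp_upmarket",
--     "regulated industries": "icp_upmarket",
--     "fortune 500": "icp_upmarket",
--     "platform": "icp_upmarket",
--     "contact sales": "gtm_sales_led",
--     "talk to": "gtm_sales_led",
--     "schedule a consultation": "gtm_sales_led",
--     "request a demo": "gtm_sales_led",
--     "custom pricing": "gtm_sales_led",
--     "dedicated account manager": "gtm_sales_led",
--     "sla": "gtm_sales_led",
--     "security advisor": "gtm_sales_led",
--     "sales team": "gtm_sales_led",
--     "enterprise pilot": "gtm_sales_led",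
--     "team trial": "gtm_sales_led",
--     "financial services": "new_vertical",
--     "healthcare": "new_vertical",
--     "hospital": "new_vertical",
--     "hospital systems": "new_vertical",
--     "health system": "new_vertical",
--     "banks": "new_vertical",
--     "fintech": "new_vertical",
--     "insurance": "new_vertical",
--     "government": "new_vertical",
--     "emea": "new_market",
--     "europe": "new_market",
--     "apac": "new_market",
--     "cross-border": "new_market",
--     "emea sales team": "new_market",
--     "soc 2": "compliance",
--     "fedramp": "compliance",
--     "hipaa": "compliance",
--     "pci dss": "compliance",
--     "gdpr": "compliance",
--     "data teams": "icp_upmarket",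
--     "collaborate": "icp_upmarket",
--     "organization": "icp_upmarket",
--     "governed metrics": "icp_upmarket",
--     "role-based access": "icp_upmarket",
-- }
--
--
-- def _best_category(kw_lower: str) -> str | None:
--     """Category of the longest matching GTM keyword, no sorting: one
--     max-selection scan in dict order; the strict '>' makes ties resolve to
--     dict-insertion order, exactly like a stable longest-first sort."""
--     best_len = -1
--     best_cat = None
--     for gtm_kw, cat in _GTM_KEYWORD_CATEGORIES.items():
--         if (kw_lower == gtm_kw or gtm_kw in kw_lower) and len(gtm_kw) > best_len:
--             best_len = len(gtm_kw)
--             best_cat = cat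
--     return best_cat
--
--
-- def _match_gtm_keywords(extracted: list[str] | None) -> list[tuple[str, str]]:
--     if not extracted or not isinstance(extracted, list):
--         return []
--
--     # stage 1: resolve each extracted keyword to its best category (or None)
--     hits = [(kw, _best_category(kw.lower().strip()))
--             for kw in extracted if isinstance(kw, str)]
--
--     # stage 2: keep per-category first matches (repeats allowed for
--     # new_vertical / compliance)
--     matches: list[tuple[str, str]] = []
--     seen_cats: set[str] = set()
--     for kw, cat in hits:
--         if cat is not None and (cat not in seen_cats or cat in ("new_vertical", "compliance")):
--             matches.append((kw, cat))
--             seen_cats.add(cat)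
--     return matches
-- ===== Notes on version B (the rewrite author's own statement) =====
-- stated objective: alternative
-- what changed: A sorts the whole GTM table longest-first on every call and takes the first match per keyword; B never sorts: it resolves each keyword with a single max-selection scan over the dict in insertion order (strict '>' so ties fall to dict order, matching the stable sort), staged as a resolve-all pass followed by a separate category-dedup pass.
import Mathlib
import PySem

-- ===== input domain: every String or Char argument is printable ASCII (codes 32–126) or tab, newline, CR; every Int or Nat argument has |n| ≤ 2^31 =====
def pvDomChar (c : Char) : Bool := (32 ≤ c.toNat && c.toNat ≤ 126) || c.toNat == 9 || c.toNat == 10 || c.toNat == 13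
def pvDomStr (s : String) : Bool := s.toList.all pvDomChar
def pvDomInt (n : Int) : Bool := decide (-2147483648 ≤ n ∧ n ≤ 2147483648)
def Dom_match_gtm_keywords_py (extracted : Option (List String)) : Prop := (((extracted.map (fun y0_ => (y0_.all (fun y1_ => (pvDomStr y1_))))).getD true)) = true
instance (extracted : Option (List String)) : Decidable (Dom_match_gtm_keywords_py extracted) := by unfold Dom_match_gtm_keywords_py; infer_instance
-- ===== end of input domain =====

set_option maxRecDepth 40000
set_option maxHeartbeats 1000000

-- B drops A's per-call longest-first sort of the GTM table: each keyword is resolved by one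
-- max-selection scan in dict order (strict '>' tie-break), then a separate dedup pass
-- (objective: alternative decomposition; same results).

-- The module-level dict _GTM_KEYWORD_CATEGORIES (distinct keys, insertion order).
def gtmKeywordCategories : List (String × String) := [("enterprise", "icp_upmarket"), ("mid-market", "icp_upmarket"), ("upmarket", "icp_upmarket"), ("regulated industries", "icp_upmarket"), ("fortune 500", "icp_upmarket"), ("platform", "icp_upmarket"), ("contact sales", "gtm_sales_led"), ("talk to", "gtm_sales_led"), ("schedule a consultation", "gtm_sales_led"), ("request a demo", "gtm_sales_led"), ("custom pricing", "gtm_sales_led"), ("dedicated account manager", "gtm_sales_led"), ("sla", "gtm_sales_led"), ("security advisor", "gtm_sales_led"), ("sales team", "gtm_sales_led"), ("enterprise pilot", "gtm_sales_led"), ("team trial", "gtm_sales_led"), ("financial services", "new_vertical"), ("healthcare", "new_vertical"), ("hospital", "new_vertical"), ("hospital systems", "new_vertical"), ("health system", "new_vertical"), ("banks", "new_vertical"), ("fintech", "new_vertical"), ("insurance", "new_vertical"), ("government", "new_vertical"), ("emea", "new_market"), ("europe", "new_market"), ("apac", "new_market"), ("cross-border", "new_market"), ("emea sales team", "new_market"),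 ("soc 2", "compliance"), ("fedramp", "compliance"), ("hipaa", "compliance"), ("pci dss", "compliance"), ("gdpr", "compliance"), ("data teams", "icp_upmarket"), ("collaborate", "icp_upmarket"), ("organization", "icp_upmarket"), ("governed metrics", "icp_upmarket"), ("role-based access", "icp_upmarket")]

-- ===== PORT A =====
-- inner 'for gtm_kw, cat in sorted_gtm: ... break' loop of A
def firstMatchA (kwLower : String) : List (String × String) → Option (String × String)
  | [] => none
  | (gtmKw, cat) :: rest =>
    if kwLower == gtmKw || PySem.Str.isIn gtmKw kwLower then some (gtmKw, cat)
    else firstMatchA kwLower rest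

-- outer 'for kw in extracted' loop of A (matches / seen_cats state); the
-- isinstance(kw, str) guard is always true under the List String typing.
def loopA (sortedGtm : List (String × String)) :
    List String → List (String × String) → PySem.Set String → List (String × String)
  | [], ms, _ => ms
  | kw :: rest, ms, seenCats =>
    let kwLower := PySem.Str.strip (PySem.Str.lower kw)
    match firstMatchA kwLower sortedGtm with
    | some (_, cat) =>
      if !(PySem.Set.contains seenCats cat) || (cat == "new_vertical" || cat == "compliance") then
        loopA sortedGtm rest (ms ++ [(kw, cat)]) (PySem.Set.add seenCats cat)
      else loopA sortedGtm rest ms seenCats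
    | none => loopA sortedGtm rest ms seenCats

def match_gtm_keywords_py (extracted : Option (List String)) : List (String × String) :=
  match extracted with
  | none => []
  | some [] => []
  | some xs =>
    let sortedGtm := PySem.List.sorted gtmKeywordCategories (fun x => PySem.Str.len x.1) true
    loopA sortedGtm xs [] PySem.Set.empty

-- ===== PORT B =====
-- the 'for gtm_kw, cat in _GTM_KEYWORD_CATEGORIES.items()' loop of _best_category,
-- carrying (best_len, best_cat)
def bestScanB (kwLower : String) (acc : Int × Option String) :
    List (String × String) → Int × Option String
  | [] => acc
  | (gtmKw, cat) :: rest =>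
    bestScanB kwLower
      (if (kwLower == gtmKw || PySem.Str.isIn gtmKw kwLower)
          && decide (PySem.Str.len gtmKw > acc.1)
       then (PySem.Str.len gtmKw, some cat) else acc) rest

-- _best_category
def bestCategory (kwLower : String) : Option String :=
  (bestScanB kwLower (-1, none) gtmKeywordCategories).2

-- stage 1: the 'hits' comprehension (isinstance filter always true under List String typing)
def stage1B (xs : List String) : List (String × Option String) :=
  xs.map (fun kw => (kw, bestCategory (PySem.Str.strip (PySem.Str.lower kw))))

-- stage 2: the dedup loop over hits
def stage2B : List (String × Option String) → List (String × String) → PySem.Set String → List (String × String)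
  | [], ms, _ => ms
  | (kw, ocat) :: rest, ms, seen =>
    match ocat with
    | some cat =>
      if !(PySem.Set.contains seen cat) || (cat == "new_vertical" || cat == "compliance") then
        stage2B rest (ms ++ [(kw, cat)]) (PySem.Set.add seen cat)
      else stage2B rest ms seen
    | none => stage2B rest ms seen

def match_gtm_keywords_py_alt (extracted : Option (List String)) : List (String × String) :=
  match extracted with
  | none => []
  | some xs => if xs.isEmpty then [] else stage2B (stage1B xs) [] PySem.Set.empty

-- ===== PRECONDITION & SPEC =====
def Spec_match_gtm_keywords_py (extracted : Option (List String)) (out : List (String × String)) : Prop := out = match_gtm_keywords_py_alt extracted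
instance (extracted : Option (List String)) (out : List (String × String)) : Decidable (Spec_match_gtm_keywords_py extracted out) := by unfold Spec_match_gtm_keywords_py; infer_instance

-- ===== CLAIM (what is proved, stated in full; the proofs are below) =====
def Claim_equal_match_gtm_keywords_py : Prop := ∀ (extracted : Option (List String)), Dom_match_gtm_keywords_py extracted → Spec_match_gtm_keywords_py extracted (match_gtm_keywords_py extracted)

-- ===== LEMMAS AND PROOFS =====
-- 'pick': the shape of one length-class step of bestScanB
def pick (f : Option (String × String)) (l : Int) (next : Int × Option String) : Int × Option String :=
  match f with
  | some pc => (l, some pc.2)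
  | none => next

def bucket25 : List (String × String) := [("dedicated account manager", "gtm_sales_led")]
def bucket23 : List (String × String) := [("schedule a consultation", "gtm_sales_led")]
def bucket20 : List (String × String) := [("regulated industries", "icp_upmarket")]
def bucket18 : List (String × String) := [("financial services", "new_vertical")]
def bucket17 : List (String × String) := [("role-based access", "icp_upmarket")]
def bucket16 : List (String × String) := [("security advisor", "gtm_sales_led"), ("enterprise pilot", "gtm_sales_led"), ("hospital systems", "new_vertical"), ("governed metrics", "icp_upmarket")]
def bucket15 : List (String × String) := [("emea sales team", "new_market")]
def bucket14 : List (String × String) := [("request a demo", "gtm_sales_led"), ("custom pricing", "gtm_sales_led")]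
def bucket13 : List (String × String) := [("contact sales", "gtm_sales_led"), ("health system", "new_vertical")]
def bucket12 : List (String × String) := [("cross-border", "new_market"), ("organization", "icp_upmarket")]
def bucket11 : List (String × String) := [("fortune 500", "icp_upmarket"), ("collaborate", "icp_upmarket")]
def bucket10 : List (String × String) := [("enterprise", "icp_upmarket"), ("mid-market", "icp_upmarket"), ("sales team", "gtm_sales_led"), ("team trial", "gtm_sales_led"), ("healthcare", "new_vertical"), ("government", "new_vertical"), ("data teams", "icp_upmarket")]
def bucket9 : List (String × String) := [("insurance", "new_vertical")]
def bucket8 : List (String × String) := [("upmarket", "icp_upmarket"), ("platform", "icp_upmarket"), ("hospital", "new_vertical")]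
def bucket7 : List (String × String) := [("talk to", "gtm_sales_led"), ("fintech", "new_vertical"), ("fedramp", "compliance"), ("pci dss", "compliance")]
def bucket6 : List (String × String) := [("europe", "new_market")]
def bucket5 : List (String × String) := [("banks", "new_vertical"), ("soc 2", "compliance"), ("hipaa", "compliance")]
def bucket4 : List (String × String) := [("emea", "new_market"), ("apac", "new_market"), ("gdpr", "compliance")]
def bucket3 : List (String × String) := [("sla", "gtm_sales_led")]
def rem1 : List (String × String) := [("enterprise", "icp_upmarket"), ("mid-market", "icp_upmarket"), ("upmarket", "icp_upmarket"), ("regulated industries", "icp_upmarket"), ("fortune 500", "icp_upmarket"), ("platform", "icp_upmarket"), ("contact sales", "gtm_sales_led"), ("talk to", "gtm_sales_led"), ("schedule a consultation", "gtm_sales_led"), ("request a demo", "gtm_sales_led"), ("custom pricing", "gtm_sales_led"), ("sla", "gtm_sales_led"), ("security advisor", "gtm_sales_led"), ("sales team", "gtm_sales_led"), ("enterprise pilot", "gtm_sales_led"), ("team trial", "gtm_sales_led"), ("financial services", "new_vertical"), ("healthcare", "new_vertical"), ("hospital", "new_vertical"), ("hospital systems", "new_vertical"), ("health system", "new_vertical"),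 ("banks", "new_vertical"), ("fintech", "new_vertical"), ("insurance", "new_vertical"), ("government", "new_vertical"), ("emea", "new_market"), ("europe", "new_market"), ("apac", "new_market"), ("cross-border", "new_market"), ("emea sales team", "new_market"), ("soc 2", "compliance"), ("fedramp", "compliance"), ("hipaa", "compliance"), ("pci dss", "compliance"), ("gdpr", "compliance"), ("data teams", "icp_upmarket"), ("collaborate", "icp_upmarket"), ("organization", "icp_upmarket"), ("governed metrics", "icp_upmarket"), ("role-based access", "icp_upmarket")]
def rem2 : List (String × String) := [("enterprise", "icp_upmarket"), ("mid-market", "icp_upmarket"), ("upmarket", "icp_upmarket"), ("regulated industries", "icp_upmarket"), ("fortune 500", "icp_upmarket"), ("platform", "icp_upmarket"), ("contact sales", "gtm_sales_led"), ("talk to", "gtm_sales_led"), ("request a demo", "gtm_sales_led"), ("custom pricing", "gtm_sales_led"), ("sla", "gtm_sales_led"), ("security advisor", "gtm_sales_led"), ("sales team", "gtm_sales_led"), ("enterprise pilot", "gtm_sales_led"), ("team trial", "gtm_sales_led"), ("financial services", "new_vertical"), ("healthcare", "new_vertical"), ("hospital", "new_vertical"), ("hospital systems", "new_vertical"), ("health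 system", "new_vertical"), ("banks", "new_vertical"), ("fintech", "new_vertical"), ("insurance", "new_vertical"), ("government", "new_vertical"), ("emea", "new_market"), ("europe", "new_market"), ("apac", "new_market"), ("cross-border", "new_market"), ("emea sales team", "new_market"), ("soc 2", "compliance"), ("fedramp", "compliance"), ("hipaa", "compliance"), ("pci dss", "compliance"), ("gdpr", "compliance"), ("data teams", "icp_upmarket"), ("collaborate", "icp_upmarket"), ("organization", "icp_upmarket"), ("governed metrics", "icp_upmarket"), ("role-based access", "icp_upmarket")]
def rem3 : List (String × String) := [("enterprise", "icp_upmarket"), ("mid-market", "icp_upmarket"), ("upmarket", "icp_upmarket"), ("fortune 500", "icp_upmarket"), ("platform", "icp_upmarket"), ("contact sales", "gtm_sales_led"), ("talk to", "gtm_sales_led"), ("request a demo", "gtm_sales_led"), ("custom pricing", "gtm_sales_led"), ("sla", "gtm_sales_led"), ("security advisor", "gtm_sales_led"), ("sales team", "gtm_sales_led"), ("enterprise pilot", "gtm_sales_led"), ("team trial", "gtm_sales_led"), ("financial services", "new_vertical"), ("healthcare", "new_vertical"), ("hospital", "new_vertical"), ("hospital systems", "new_vertical"), ("health system", "new_vertical"),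 ("banks", "new_vertical"), ("fintech", "new_vertical"), ("insurance", "new_vertical"), ("government", "new_vertical"), ("emea", "new_market"), ("europe", "new_market"), ("apac", "new_market"), ("cross-border", "new_market"), ("emea sales team", "new_market"), ("soc 2", "compliance"), ("fedramp", "compliance"), ("hipaa", "compliance"), ("pci dss", "compliance"), ("gdpr", "compliance"), ("data teams", "icp_upmarket"), ("collaborate", "icp_upmarket"), ("organization", "icp_upmarket"), ("governed metrics", "icp_upmarket"), ("role-based access", "icp_upmarket")]
def rem4 : List (String × String) := [("enterprise", "icp_upmarket"), ("mid-market", "icp_upmarket"), ("upmarket", "icp_upmarket"), ("fortune 500", "icp_upmarket"), ("platform", "icp_upmarket"), ("contact sales", "gtm_sales_led"), ("talk to", "gtm_sales_led"), ("request a demo", "gtm_sales_led"), ("custom pricing", "gtm_sales_led"), ("sla", "gtm_sales_led"), ("security advisor", "gtm_sales_led"), ("sales team", "gtm_sales_led"), ("enterprise pilot", "gtm_sales_led"), ("team trial", "gtm_sales_led"), ("healthcare", "new_vertical"), ("hospital", "new_vertical"), ("hospital systems", "new_vertical"), ("health system", "new_vertical"), ("banks", "new_vertical"), ("fintech", "new_vertical"),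 ("insurance", "new_vertical"), ("government", "new_vertical"), ("emea", "new_market"), ("europe", "new_market"), ("apac", "new_market"), ("cross-border", "new_market"), ("emea sales team", "new_market"), ("soc 2", "compliance"), ("fedramp", "compliance"), ("hipaa", "compliance"), ("pci dss", "compliance"), ("gdpr", "compliance"), ("data teams", "icp_upmarket"), ("collaborate", "icp_upmarket"), ("organization", "icp_upmarket"), ("governed metrics", "icp_upmarket"), ("role-based access", "icp_upmarket")]
def rem5 : List (String × String) := [("enterprise", "icp_upmarket"), ("mid-market", "icp_upmarket"), ("upmarket", "icp_upmarket"), ("fortune 500", "icp_upmarket"), ("platform", "icp_upmarket"), ("contact sales", "gtm_sales_led"), ("talk to", "gtm_sales_led"), ("request a demo", "gtm_sales_led"), ("custom pricing", "gtm_sales_led"), ("sla", "gtm_sales_led"), ("security advisor", "gtm_sales_led"), ("sales team", "gtm_sales_led"), ("enterprise pilot", "gtm_sales_led"), ("team trial", "gtm_sales_led"), ("healthcare", "new_vertical"), ("hospital", "new_vertical"), ("hospital systems", "new_vertical"), ("health system", "new_vertical"), ("banks", "new_vertical"), ("fintech", "new_vertical"), ("insurance", "new_vertical"), ("government", "new_vertical"),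 ("emea", "new_market"), ("europe", "new_market"), ("apac", "new_market"), ("cross-border", "new_market"), ("emea sales team", "new_market"), ("soc 2", "compliance"), ("fedramp", "compliance"), ("hipaa", "compliance"), ("pci dss", "compliance"), ("gdpr", "compliance"), ("data teams", "icp_upmarket"), ("collaborate", "icp_upmarket"), ("organization", "icp_upmarket"), ("governed metrics", "icp_upmarket")]
def rem6 : List (String × String) := [("enterprise", "icp_upmarket"), ("mid-market", "icp_upmarket"), ("upmarket", "icp_upmarket"), ("fortune 500", "icp_upmarket"), ("platform", "icp_upmarket"), ("contact sales", "gtm_sales_led"), ("talk to", "gtm_sales_led"), ("request a demo", "gtm_sales_led"), ("custom pricing", "gtm_sales_led"), ("sla", "gtm_sales_led"), ("sales team", "gtm_sales_led"), ("team trial", "gtm_sales_led"), ("healthcare", "new_vertical"), ("hospital", "new_vertical"), ("health system", "new_vertical"), ("banks", "new_vertical"), ("fintech", "new_vertical"), ("insurance", "new_vertical"), ("government", "new_vertical"), ("emea", "new_market"), ("europe", "new_market"), ("apac", "new_market"), ("cross-border", "new_market"), ("emea sales team", "new_market"), ("soc 2", "compliance"), ("fedramp", "compliance"), ("hipaa",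 "compliance"), ("pci dss", "compliance"), ("gdpr", "compliance"), ("data teams", "icp_upmarket"), ("collaborate", "icp_upmarket"), ("organization", "icp_upmarket")]
def rem7 : List (String × String) := [("enterprise", "icp_upmarket"), ("mid-market", "icp_upmarket"), ("upmarket", "icp_upmarket"), ("fortune 500", "icp_upmarket"), ("platform", "icp_upmarket"), ("contact sales", "gtm_sales_led"), ("talk to", "gtm_sales_led"), ("request a demo", "gtm_sales_led"), ("custom pricing", "gtm_sales_led"), ("sla", "gtm_sales_led"), ("sales team", "gtm_sales_led"), ("team trial", "gtm_sales_led"), ("healthcare", "new_vertical"), ("hospital", "new_vertical"), ("health system", "new_vertical"), ("banks", "new_vertical"), ("fintech", "new_vertical"), ("insurance", "new_vertical"), ("government", "new_vertical"), ("emea", "new_market"), ("europe", "new_market"), ("apac", "new_market"), ("cross-border", "new_market"), ("soc 2", "compliance"), ("fedramp", "compliance"), ("hipaa", "compliance"), ("pci dss", "compliance"), ("gdpr", "compliance"), ("data teams", "icp_upmarket"), ("collaborate", "icp_upmarket"), ("organization", "icp_upmarket")]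
def rem8 : List (String × String) := [("enterprise", "icp_upmarket"), ("mid-market", "icp_upmarket"), ("upmarket", "icp_upmarket"), ("fortune 500", "icp_upmarket"), ("platform", "icp_upmarket"), ("contact sales", "gtm_sales_led"), ("talk to", "gtm_sales_led"), ("sla", "gtm_sales_led"), ("sales team", "gtm_sales_led"), ("team trial", "gtm_sales_led"), ("healthcare", "new_vertical"), ("hospital", "new_vertical"), ("health system", "new_vertical"), ("banks", "new_vertical"), ("fintech", "new_vertical"), ("insurance", "new_vertical"), ("government", "new_vertical"), ("emea", "new_market"), ("europe", "new_market"), ("apac", "new_market"), ("cross-border", "new_market"), ("soc 2", "compliance"), ("fedramp", "compliance"), ("hipaa", "compliance"), ("pci dss", "compliance"), ("gdpr", "compliance"), ("data teams", "icp_upmarket"), ("collaborate", "icp_upmarket"), ("organization", "icp_upmarket")]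
def rem9 : List (String × String) := [("enterprise", "icp_upmarket"), ("mid-market", "icp_upmarket"), ("upmarket", "icp_upmarket"), ("fortune 500", "icp_upmarket"), ("platform", "icp_upmarket"), ("talk to", "gtm_sales_led"), ("sla", "gtm_sales_led"), ("sales team", "gtm_sales_led"), ("team trial", "gtm_sales_led"), ("healthcare", "new_vertical"), ("hospital", "new_vertical"), ("banks", "new_vertical"), ("fintech", "new_vertical"), ("insurance", "new_vertical"), ("government", "new_vertical"), ("emea", "new_market"), ("europe", "new_market"), ("apac", "new_market"), ("cross-border", "new_market"), ("soc 2", "compliance"), ("fedramp", "compliance"), ("hipaa", "compliance"), ("pci dss", "compliance"), ("gdpr", "compliance"), ("data teams", "icp_upmarket"), ("collaborate", "icp_upmarket"), ("organization", "icp_upmarket")]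
def rem10 : List (String × String) := [("enterprise", "icp_upmarket"), ("mid-market", "icp_upmarket"), ("upmarket", "icp_upmarket"), ("fortune 500", "icp_upmarket"), ("platform", "icp_upmarket"), ("talk to", "gtm_sales_led"), ("sla", "gtm_sales_led"), ("sales team", "gtm_sales_led"), ("team trial", "gtm_sales_led"), ("healthcare", "new_vertical"), ("hospital", "new_vertical"), ("banks", "new_vertical"), ("fintech", "new_vertical"), ("insurance", "new_vertical"), ("government", "new_vertical"), ("emea", "new_market"), ("europe", "new_market"), ("apac", "new_market"), ("soc 2", "compliance"), ("fedramp", "compliance"), ("hipaa", "compliance"), ("pci dss", "compliance"), ("gdpr", "compliance"), ("data teams", "icp_upmarket"), ("collaborate", "icp_upmarket")]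
def rem11 : List (String × String) := [("enterprise", "icp_upmarket"), ("mid-market", "icp_upmarket"), ("upmarket", "icp_upmarket"), ("platform", "icp_upmarket"), ("talk to", "gtm_sales_led"), ("sla", "gtm_sales_led"), ("sales team", "gtm_sales_led"), ("team trial", "gtm_sales_led"), ("healthcare", "new_vertical"), ("hospital", "new_vertical"), ("banks", "new_vertical"), ("fintech", "new_vertical"), ("insurance", "new_vertical"), ("government", "new_vertical"), ("emea", "new_market"), ("europe", "new_market"), ("apac", "new_market"), ("soc 2", "compliance"), ("fedramp", "compliance"), ("hipaa", "compliance"), ("pci dss", "compliance"), ("gdpr", "compliance"), ("data teams", "icp_upmarket")]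
def rem12 : List (String × String) := [("upmarket", "icp_upmarket"), ("platform", "icp_upmarket"), ("talk to", "gtm_sales_led"), ("sla", "gtm_sales_led"), ("hospital", "new_vertical"), ("banks", "new_vertical"), ("fintech", "new_vertical"), ("insurance", "new_vertical"), ("emea", "new_market"), ("europe", "new_market"), ("apac", "new_market"), ("soc 2", "compliance"), ("fedramp", "compliance"), ("hipaa", "compliance"), ("pci dss", "compliance"), ("gdpr", "compliance")]
def rem13 : List (String × String) := [("upmarket", "icp_upmarket"), ("platform", "icp_upmarket"), ("talk to", "gtm_sales_led"), ("sla", "gtm_sales_led"), ("hospital", "new_vertical"), ("banks", "new_vertical"), ("fintech", "new_vertical"), ("emea", "new_market"), ("europe", "new_market"), ("apac", "new_market"), ("soc 2", "compliance"), ("fedramp", "compliance"), ("hipaa", "compliance"), ("pci dss", "compliance"), ("gdpr", "compliance")]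
def rem14 : List (String × String) := [("talk to", "gtm_sales_led"), ("sla", "gtm_sales_led"), ("banks", "new_vertical"), ("fintech", "new_vertical"), ("emea", "new_market"), ("europe", "new_market"), ("apac", "new_market"), ("soc 2", "compliance"), ("fedramp", "compliance"), ("hipaa", "compliance"), ("pci dss", "compliance"), ("gdpr", "compliance")]
def rem15 : List (String × String) := [("sla", "gtm_sales_led"), ("banks", "new_vertical"), ("emea", "new_market"), ("europe", "new_market"), ("apac", "new_market"), ("soc 2", "compliance"), ("hipaa", "compliance"), ("gdpr", "compliance")]
def rem16 : List (String × String) := [("sla", "gtm_sales_led"), ("banks", "new_vertical"), ("emea", "new_market"), ("apac", "new_market"), ("soc 2", "compliance"), ("hipaa", "compliance"), ("gdpr", "compliance")]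
def rem17 : List (String × String) := [("sla", "gtm_sales_led"), ("emea", "new_market"), ("apac", "new_market"), ("gdpr", "compliance")]
def rem18 : List (String × String) := [("sla", "gtm_sales_led")]

-- A's stable longest-first sort is exactly the length classes concatenated longest-first
lemma sortedGtm_eq :
    PySem.List.sorted gtmKeywordCategories (fun x => PySem.Str.len x.1) true
      = bucket25 ++ bucket23 ++ bucket20 ++ bucket18 ++ bucket17 ++ bucket16 ++ bucket15 ++ bucket14 ++ bucket13 ++ bucket12 ++ bucket11 ++ bucket10 ++ bucket9 ++ bucket8 ++ bucket7 ++ bucket6 ++ bucket5 ++ bucket4 ++ bucket3 := by decide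

lemma firstMatchA_append (s : String) (xs ys : List (String × String)) :
    firstMatchA s (xs ++ ys) = (firstMatchA s xs).or (firstMatchA s ys) := by
  induction xs with
  | nil => rfl
  | cons p rest ih =>
    cases p with | mk g c =>
    simp only [List.cons_append, firstMatchA]
    split_ifs <;> simp [ih]

-- once the best is at least as long as everything left, the scan keeps it
lemma bestScanB_absorb (s : String) (L : List (String × String)) (acc : Int × Option String)
    (h : ∀ p ∈ L, PySem.Str.len p.1 ≤ acc.1) : bestScanB s acc L = acc := by
  induction L with
  | nil => rfl
  | cons p rest ih =>
    cases p with | mk g c =>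
    have hg : PySem.Str.len g ≤ acc.1 := h (g, c) (by simp)
    have : ((s == g || PySem.Str.isIn g s) && decide (PySem.Str.len g > acc.1)) = false := by
      simp only [Bool.and_eq_false_iff, decide_eq_false_iff_not]
      right; omega
    rw [bestScanB, this, if_neg (by simp)]
    exact ih (fun q hq => h q (by simp [hq]))

-- peel one length class off a bounded scan: the class behaves as a first-match,
-- the rest of the scan continues on the remainder
lemma bestScanB_step (s : String) (l : Int) (L : List (String × String))
    (acc : Int × Option String)
    (hbound : ∀ p ∈ L, PySem.Str.len p.1 ≤ l) (hacc : acc.1 < l) :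
    bestScanB s acc L
      = pick (firstMatchA s (L.filter (fun p => PySem.Str.len p.1 == l))) l
          (bestScanB s acc (L.filter (fun p => !(PySem.Str.len p.1 == l)))) := by
  induction L generalizing acc with
  | nil => rfl
  | cons p rest ih =>
    cases p with | mk g c =>
    have hrest : ∀ q ∈ rest, PySem.Str.len q.1 ≤ l := fun q hq => hbound q (by simp [hq])
    rw [List.filter_cons, List.filter_cons]
    by_cases hk : PySem.Str.len g = l
    · have hk2 : ((g.length : Int)) = l := by simpa using hk
      rw [if_pos (by simp [hk2]), if_neg (by simp [hk2])]
      by_cases hm : (s == g || PySem.Str.isIn g s) = true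
      · have hgt : decide (PySem.Str.len g > acc.1) = true := by
          simp only [decide_eq_true_eq, PySem.Str.len_eq, String.length_toList]
          omega
        have hcond : ((s == g || PySem.Str.isIn g s) && decide (PySem.Str.len g > acc.1)) = true := by
          rw [hm, hgt]; rfl
        simp only [bestScanB, firstMatchA]
        rw [hcond, hm, if_pos rfl, if_pos rfl]
        rw [bestScanB_absorb s rest (PySem.Str.len g, some c)
            (fun q hq => by have h := hrest q hq; simp at h ⊢; omega)]
        simp [pick, hk2]
      · have hm' : (s == g || PySem.Str.isIn g s) = false := by
          revert hm; cases (s == g || PySem.Str.isIn g s) <;> simp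
        have hcond : ((s == g || PySem.Str.isIn g s) && decide (PySem.Str.len g > acc.1)) = false := by
          rw [hm']; rfl
        simp only [bestScanB, firstMatchA]
        rw [hcond, hm']
        rw [if_neg (by simp), if_neg (by simp)]
        exact ih acc hrest hacc
    · have hk2 : ¬ ((g.length : Int)) = l := by simpa using hk
      rw [if_neg (by simp [hk2]), if_pos (by simp [hk2])]
      simp only [bestScanB]
      refine ih _ hrest ?_
      split_ifs with h
      · have hle := hbound (g, c) (by simp)
        simp at hle ⊢
        omega
      · exact hacc

-- one length level: first-match of the class + rest, on both sides
lemma level (s : String) (l : Int) (bucket R R' : List (String × String))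
    (restA : Option (String × String))
    (hl : (-1 : Int) < l)
    (hb : R.filter (fun p => PySem.Str.len p.1 == l) = bucket)
    (hr : R.filter (fun p => !(PySem.Str.len p.1 == l)) = R')
    (hbound : ∀ p ∈ R, PySem.Str.len p.1 ≤ l)
    (hrest : restA.map Prod.snd = (bestScanB s (-1, none) R').2) :
    ((firstMatchA s bucket).or restA).map Prod.snd = (bestScanB s (-1, none) R).2 := by
  rw [bestScanB_step s l R (-1, none) hbound hl, hb, hr]
  cases firstMatchA s bucket <;> simp [pick, hrest]

-- per-keyword agreement: A's first match on the sorted table carries the same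
-- category as B's max-selection scan on the unsorted table
lemma select_eq (s : String) :
    (firstMatchA s (PySem.List.sorted gtmKeywordCategories (fun x => PySem.Str.len x.1) true)).map Prod.snd
      = bestCategory s := by
  rw [sortedGtm_eq, bestCategory]
  simp only [firstMatchA_append, Option.or_assoc]

  refine level s 25 bucket25 gtmKeywordCategories rem1 _ (by norm_num) (by decide) (by decide) (by decide) ?_
  refine level s 23 bucket23 rem1 rem2 _ (by norm_num) (by decide) (by decide) (by decide) ?_
  refine level s 20 bucket20 rem2 rem3 _ (by norm_num) (by decide) (by decide) (by decide) ?_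
  refine level s 18 bucket18 rem3 rem4 _ (by norm_num) (by decide) (by decide) (by decide) ?_
  refine level s 17 bucket17 rem4 rem5 _ (by norm_num) (by decide) (by decide) (by decide) ?_
  refine level s 16 bucket16 rem5 rem6 _ (by norm_num) (by decide) (by decide) (by decide) ?_
  refine level s 15 bucket15 rem6 rem7 _ (by norm_num) (by decide) (by decide) (by decide) ?_
  refine level s 14 bucket14 rem7 rem8 _ (by norm_num) (by decide) (by decide) (by decide) ?_
  refine level s 13 bucket13 rem8 rem9 _ (by norm_num) (by decide) (by decide) (by decide) ?_
  refine level s 12 bucket12 rem9 rem10 _ (by norm_num) (by decide) (by decide) (by decide) ?_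
  refine level s 11 bucket11 rem10 rem11 _ (by norm_num) (by decide) (by decide) (by decide) ?_
  refine level s 10 bucket10 rem11 rem12 _ (by norm_num) (by decide) (by decide) (by decide) ?_
  refine level s 9 bucket9 rem12 rem13 _ (by norm_num) (by decide) (by decide) (by decide) ?_
  refine level s 8 bucket8 rem13 rem14 _ (by norm_num) (by decide) (by decide) (by decide) ?_
  refine level s 7 bucket7 rem14 rem15 _ (by norm_num) (by decide) (by decide) (by decide) ?_
  refine level s 6 bucket6 rem15 rem16 _ (by norm_num) (by decide) (by decide) (by decide) ?_
  refine level s 5 bucket5 rem16 rem17 _ (by norm_num) (by decide) (by decide) (by decide) ?_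
  refine level s 4 bucket4 rem17 rem18 _ (by norm_num) (by decide) (by decide) (by decide) ?_
  rw [bestScanB_step s 3 rem18 (-1, none) (by decide) (by norm_num),
      show rem18.filter (fun p => PySem.Str.len p.1 == 3) = bucket3 from by decide,
      show rem18.filter (fun p => !(PySem.Str.len p.1 == 3)) = [] from by decide]
  cases firstMatchA s bucket3 <;> simp [pick, bestScanB]

-- the two outer loops agree
lemma loop_eq (xs : List String) (ms : List (String × String)) (seen : PySem.Set String) :
    loopA (PySem.List.sorted gtmKeywordCategories (fun x => PySem.Str.len x.1) true) xs ms seen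
      = stage2B (stage1B xs) ms seen := by
  induction xs generalizing ms seen with
  | nil => rfl
  | cons kw rest ih =>
    simp only [loopA, stage1B, List.map_cons, stage2B]
    rw [show bestCategory (PySem.Str.strip (PySem.Str.lower kw))
          = (firstMatchA (PySem.Str.strip (PySem.Str.lower kw))
              (PySem.List.sorted gtmKeywordCategories (fun x => PySem.Str.len x.1) true)).map Prod.snd
        from (select_eq _).symm]
    cases h : firstMatchA (PySem.Str.strip (PySem.Str.lower kw))
        (PySem.List.sorted gtmKeywordCategories (fun x => PySem.Str.len x.1) true) with
    | none => exact ih ms seen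
    | some pc =>
      cases pc with | mk g c =>
      simp only [Option.map_some]
      split_ifs with hc
      · exact ih _ _
      · exact ih ms seen

-- ===== VERDICT (by name: the statement is the Claim_ definition above) =====
theorem match_gtm_keywords_py_spec : Claim_equal_match_gtm_keywords_py := by
  intro extracted _
  unfold Spec_match_gtm_keywords_py match_gtm_keywords_py match_gtm_keywords_py_alt
  match extracted with
  | none => rfl
  | some [] => rfl
  | some (x :: xs) =>
    show loopA (PySem.List.sorted gtmKeywordCategories (fun x => PySem.Str.len x.1) true)
        (x :: xs) [] PySem.Set.empty
      = if (x :: xs).isEmpty = true then [] else stage2B (stage1B (x :: xs)) [] PySem.Set.empty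
    rw [List.isEmpty_cons, if_neg (by simp)]
    exact loop_eq (x :: xs) [] PySem.Set.empty
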